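-- pv_equiv track=rewrite | github.com/ocarl/aoc2018 | p5b.py | destroyer
-- ===== SOURCE A (Python) =====
-- def destroyer(instring: str, inchar: str):
--     inlist = list(instring)
--     for i, char in enumerate(inlist):
--         if char == inchar:
--             inlist.pop(i)
--             continue
--         if char == inchar.swapcase():
--             inlist.pop(i)
--             continue
--         try:
--             if char == inlist[i + 1].swapcase():
--                 inlist.pop(i)
--                 inlist.pop(i)
--         except IndexError:
--             pass
--     outstring = ''.join(inlist)
--     if outstring != instring:
--         outstring = destroyer(outstring, inchar)
--     return outstring
-- ===== SOURCE B (Python) =====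
-- def destroyer(instring: str, inchar: str):
--     other = inchar.swapcase()
--     stack = []
--     for c in instring:
--         if c == inchar or c == other:
--             continue
--         if stack and stack[-1] == c.swapcase():
--             stack.pop()
--         else:
--             stack.append(c)
--     return ''.join(stack)
-- ===== Notes on version B (the rewrite author's own statement) =====
-- stated objective: faster
-- what changed: Replaces A's repeated scan-with-pops-until-fixpoint (rescanning the whole string each round) by a single left-to-right pass with a stack that skips the target unit and pops on a swapcase match.
import Mathlib
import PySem

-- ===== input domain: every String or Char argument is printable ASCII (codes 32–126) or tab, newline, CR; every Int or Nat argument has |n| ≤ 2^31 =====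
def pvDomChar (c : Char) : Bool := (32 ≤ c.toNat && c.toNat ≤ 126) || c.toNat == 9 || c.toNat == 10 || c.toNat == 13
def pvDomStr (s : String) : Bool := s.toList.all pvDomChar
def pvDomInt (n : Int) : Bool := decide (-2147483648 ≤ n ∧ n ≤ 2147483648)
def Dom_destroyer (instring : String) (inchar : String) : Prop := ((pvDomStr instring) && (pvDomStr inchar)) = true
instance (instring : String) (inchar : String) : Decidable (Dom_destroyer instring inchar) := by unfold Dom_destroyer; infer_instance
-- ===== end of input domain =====

-- B replaces A's repeated scan-with-pops-until-fixpoint by one left-to-right stack pass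
-- (skip the target unit, pop on a swapcase match): asymptotically faster, same output.

-- shared helper: Python's str.swapcase on one character — exact on the ASCII domain
def pySwap (c : Char) : Char :=
  if 97 ≤ c.toNat ∧ c.toNat ≤ 122 then Char.ofNat (c.toNat - 32)
  else if 65 ≤ c.toNat ∧ c.toNat ≤ 90 then Char.ofNat (c.toNat + 32)
  else c

def isT1 (I : List Char) (c : Char) : Bool := [c] == I
def isT2 (I : List Char) (c : Char) : Bool := [c] == I.map pySwap

-- ===== PORT A =====
-- one `for i, char in enumerate(inlist)` pass of A; `I` is inchar.toList, pops are eraseIdx;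
-- `fuel` is a totality device only: the callers pass enough for every loop iteration
def passA (I : List Char) : Nat → List Char → Nat → List Char
  | 0, l, _ => l
  | fuel + 1, l, i =>
    if h : i < l.length then
      if isT1 I l[i] then passA I fuel (l.eraseIdx i) (i + 1)
      else if isT2 I l[i] then passA I fuel (l.eraseIdx i) (i + 1)
      else if h2 : i + 1 < l.length then
        if l[i] == pySwap l[i + 1] then passA I fuel ((l.eraseIdx i).eraseIdx i) (i + 1)
        else passA I fuel l (i + 1)
      else passA I fuel l (i + 1)
    else l

-- the `if outstring != instring: recurse` fixpoint loop of A (`fuel` again only for totality)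
def destroyFix (I : List Char) : Nat → List Char → List Char
  | 0, l => l
  | fuel + 1, l =>
    let out := passA I l.length l 0
    if out == l then out else destroyFix I fuel out

def destroyer (instring : String) (inchar : String) : String :=
  String.ofList (destroyFix inchar.toList (instring.toList.length + 1) instring.toList)

-- ===== PORT B =====
-- one step of B's stack loop: skip target unit; pop on swapcase match; else push
def stackStep (I : List Char) (st : List Char) (c : Char) : List Char :=
  if isT1 I c || isT2 I c then st
  else match st with
    | t :: rest => if t == pySwap c then rest else c :: st
    | [] => [c]

def destroyer_alt (instring : String) (inchar : String) : String :=
  String.ofList ((instring.toList.foldl (stackStep inchar.toList) []).reverse)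

-- ===== PRECONDITION & SPEC =====
def Spec_destroyer (instring : String) (inchar : String) (out : String) : Prop := out = destroyer_alt instring inchar
instance (instring : String) (inchar : String) (out : String) : Decidable (Spec_destroyer instring inchar out) := by unfold Spec_destroyer; infer_instance

-- ===== CLAIM (what is proved, stated in full; the proofs are below) =====
def Claim_equal_destroyer : Prop := ∀ (instring : String) (inchar : String), Dom_destroyer instring inchar → Spec_destroyer instring inchar (destroyer instring inchar)

-- ===== LEMMAS AND PROOFS =====

theorem stackStep_target (I st : List Char) (c : Char)
    (h : (isT1 I c || isT2 I c) = true) : stackStep I st c = st := by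
  unfold stackStep; rw [if_pos h]

theorem stackStep_nil (I : List Char) (c : Char)
    (h : (isT1 I c || isT2 I c) = false) : stackStep I [] c = [c] := by
  unfold stackStep; rw [h]; rfl

theorem stackStep_pop (I : List Char) (t : Char) (rest : List Char) (c : Char)
    (h : (isT1 I c || isT2 I c) = false) (hp : (t == pySwap c) = true) :
    stackStep I (t :: rest) c = rest := by
  unfold stackStep; rw [h]; simp [hp]

theorem stackStep_push (I : List Char) (t : Char) (rest : List Char) (c : Char)
    (h : (isT1 I c || isT2 I c) = false) (hp : (t == pySwap c) = false) :
    stackStep I (t :: rest) c = c :: t :: rest := by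
  unfold stackStep; rw [h]; simp [hp]

theorem pySwap_pySwap (c : Char) : pySwap (pySwap c) = c := by
  unfold pySwap
  by_cases hl : 97 ≤ c.toNat ∧ c.toNat ≤ 122
  · have hv : Nat.isValidChar (c.toNat - 32) := by left; omega
    rw [if_pos hl, Char.toNat_ofNat, if_pos hv]
    rw [if_neg (by omega), if_pos (by omega)]
    have : c.toNat - 32 + 32 = c.toNat := by omega
    rw [this, Char.ofNat_toNat]
  · rw [if_neg hl]
    by_cases hu : 65 ≤ c.toNat ∧ c.toNat ≤ 90
    · have hv : Nat.isValidChar (c.toNat + 32) := by left; omega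
      rw [if_pos hu, Char.toNat_ofNat, if_pos hv]
      rw [if_pos (by omega)]
      have : c.toNat + 32 - 32 = c.toNat := by omega
      rw [this, Char.ofNat_toNat]
    · rw [if_neg hu, if_neg hl, if_neg hu]

theorem target_swap (I : List Char) (c : Char)
    (h : (isT1 I c || isT2 I c) = true) :
    (isT1 I (pySwap c) || isT2 I (pySwap c)) = true := by
  simp only [isT1, isT2, Bool.or_eq_true, beq_iff_eq] at h ⊢
  rcases h with h | h
  · right; rw [← h]; rfl
  · left
    cases I with
    | nil => simp at h
    | cons d t =>
      cases t with
      | nil =>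
        simp at h
        simp [h, pySwap_pySwap]
      | cons e t2 => simp at h

theorem target_swap_false (I : List Char) (c : Char)
    (h : (isT1 I c || isT2 I c) = false) :
    (isT1 I (pySwap c) || isT2 I (pySwap c)) = false := by
  have hne : (isT1 I (pySwap c) || isT2 I (pySwap c)) ≠ true := by
    intro hT
    have h2 := target_swap I (pySwap c) hT
    rw [pySwap_pySwap] at h2
    rw [h2] at h
    cases h
  simpa using hne

-- the invariant of B's stack: no two adjacent entries react
abbrev StkInv (st : List Char) : Prop :=
  List.IsChain (fun a b => (b == pySwap a) = false) st

theorem stkInv_step (I : List Char) (st : List Char) (c : Char) (h : StkInv st) :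
    StkInv (stackStep I st c) := by
  cases ht : (isT1 I c || isT2 I c) with
  | true => rw [stackStep_target I st c ht]; exact h
  | false =>
    cases st with
    | nil => rw [stackStep_nil I c ht]; simp
    | cons t rest =>
      cases hp : (t == pySwap c) with
      | true => rw [stackStep_pop I t rest c ht hp]; exact h.tail
      | false =>
        rw [stackStep_push I t rest c ht hp]
        exact List.isChain_cons_cons.mpr ⟨by simpa using hp, h⟩

-- processing two reacting characters leaves the stack unchanged
theorem step2_eq (I : List Char) (st : List Char) (a b : Char)
    (hinv : StkInv st) (hab : (a == pySwap b) = true) :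
    stackStep I (stackStep I st a) b = st := by
  have hab' : a = pySwap b := by simpa using hab
  have hba : b = pySwap a := by rw [hab', pySwap_pySwap]
  cases ht : (isT1 I a || isT2 I a) with
  | true =>
    have htb : (isT1 I b || isT2 I b) = true := by
      rw [hba]; exact target_swap I a ht
    rw [stackStep_target I st a ht, stackStep_target I st b htb]
  | false =>
    have htb : (isT1 I b || isT2 I b) = false := by
      rw [hba]; exact target_swap_false I a ht
    cases st with
    | nil =>
      rw [stackStep_nil I a ht,
        stackStep_pop I a [] b htb (by rw [hab']; simp)]
    | cons t rest =>
      cases hp : (t == pySwap a) with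
      | true =>
        have htb' : t = b := by rw [hba]; simpa using hp
        rw [stackStep_pop I t rest a ht hp]
        cases rest with
        | nil =>
          rw [stackStep_nil I b htb, htb']
        | cons t2 r2 =>
          have hnr : (t2 == pySwap t) = false := (List.isChain_cons_cons.mp hinv).1
          rw [htb'] at hnr
          rw [stackStep_push I t2 r2 b htb hnr, htb']
      | false =>
        rw [stackStep_push I t rest a ht hp,
          stackStep_pop I a (t :: rest) b htb (by rw [hab']; simp)]

-- deleting a target character anywhere does not change the fold
theorem red_erase1 (I : List Char) :
    ∀ (l : List Char) (i : Nat) (st : List Char), (h : i < l.length) →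
    (isT1 I l[i] || isT2 I l[i]) = true →
    List.foldl (stackStep I) st l = List.foldl (stackStep I) st (l.eraseIdx i) := by
  intro l
  induction l with
  | nil => intro i st h; simp at h
  | cons c r ih =>
    intro i st h htar
    cases i with
    | zero =>
      simp only [List.eraseIdx_zero, List.tail_cons, List.foldl_cons]
      simp only [List.getElem_cons_zero] at htar
      rw [stackStep_target I st c htar]
    | succ j =>
      simp only [List.eraseIdx_cons_succ, List.foldl_cons]
      simp only [List.getElem_cons_succ] at htar
      exact ih j _ (by simpa using h) htar

-- deleting a reacting adjacent pair does not change the fold (needs the stack invariant)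
theorem red_erase2 (I : List Char) :
    ∀ (l : List Char) (i : Nat) (st : List Char), StkInv st → (h : i + 1 < l.length) →
    (l[i] == pySwap l[i + 1]) = true →
    List.foldl (stackStep I) st l = List.foldl (stackStep I) st ((l.eraseIdx i).eraseIdx i) := by
  intro l
  induction l with
  | nil => intro i st hinv h; simp at h
  | cons c r ih =>
    intro i st hinv h hab
    cases i with
    | zero =>
      cases r with
      | nil => simp at h
      | cons b v =>
        simp only [List.getElem_cons_zero, List.getElem_cons_succ] at hab
        simp only [List.eraseIdx_zero, List.tail_cons, List.foldl_cons]
        rw [step2_eq I st c b hinv hab]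
    | succ j =>
      simp only [List.eraseIdx_cons_succ, List.foldl_cons]
      simp only [List.getElem_cons_succ] at hab
      exact ih j _ (stkInv_step I st c hinv) (by simpa using h) hab

theorem stkInv_nil : StkInv [] := by simp

-- A's single pass does not change B's fold (any fuel)
theorem pass_red (I : List Char) :
    ∀ (fuel : Nat) (l : List Char) (i : Nat),
    List.foldl (stackStep I) [] (passA I fuel l i) = List.foldl (stackStep I) [] l := by
  intro fuel
  induction fuel with
  | zero => intro l i; rw [passA]
  | succ n ih =>
    intro l i
    rw [passA]
    by_cases h : i < l.length
    · rw [dif_pos h]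
      by_cases h1 : isT1 I l[i] = true
      · rw [if_pos h1, ih, ← red_erase1 I l i [] h (by rw [h1]; simp)]
      · rw [if_neg h1]
        by_cases h2 : isT2 I l[i] = true
        · rw [if_pos h2, ih, ← red_erase1 I l i [] h (by rw [h2]; simp)]
        · rw [if_neg h2]
          by_cases h3 : i + 1 < l.length
          · rw [dif_pos h3]
            by_cases h4 : (l[i] == pySwap l[i + 1]) = true
            · rw [if_pos h4, ih, ← red_erase2 I l i [] stkInv_nil h3 h4]
            · rw [if_neg h4, ih]
          · rw [dif_neg h3, ih]
    · rw [dif_neg h]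

-- the pass only ever removes characters
theorem passA_eq_or_lt (I : List Char) :
    ∀ (fuel : Nat) (l : List Char) (i : Nat),
    passA I fuel l i = l ∨ (passA I fuel l i).length < l.length := by
  intro fuel
  induction fuel with
  | zero => intro l i; left; rw [passA]
  | succ n ih =>
    intro l i
    rw [passA]
    by_cases h : i < l.length
    · rw [dif_pos h]
      have hel : (l.eraseIdx i).length = l.length - 1 := by
        rw [List.length_eraseIdx, if_pos h]
      by_cases h1 : isT1 I l[i] = true
      · rw [if_pos h1]
        right
        rcases ih (l.eraseIdx i) (i + 1) with he | hl
        · rw [he]; omega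
        · omega
      · rw [if_neg h1]
        by_cases h2 : isT2 I l[i] = true
        · rw [if_pos h2]
          right
          rcases ih (l.eraseIdx i) (i + 1) with he | hl
          · rw [he]; omega
          · omega
        · rw [if_neg h2]
          by_cases h3 : i + 1 < l.length
          · rw [dif_pos h3]
            by_cases h4 : (l[i] == pySwap l[i + 1]) = true
            · rw [if_pos h4]
              right
              have hel2 : ((l.eraseIdx i).eraseIdx i).length = l.length - 2 := by
                rw [List.length_eraseIdx, List.length_eraseIdx]
                split_ifs <;> omega
              rcases ih ((l.eraseIdx i).eraseIdx i) (i + 1) with he | hl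
              · rw [he]; omega
              · omega
            · rw [if_neg h4]; exact ih l (i + 1)
          · rw [dif_neg h3]; exact ih l (i + 1)
    · rw [dif_neg h]; left; rfl

-- A's fixpoint loop does not change B's fold (any fuel)
theorem destroyFix_red (I : List Char) :
    ∀ (fuel : Nat) (l : List Char),
    List.foldl (stackStep I) [] (destroyFix I fuel l) = List.foldl (stackStep I) [] l := by
  intro fuel
  induction fuel with
  | zero => intro l; rw [destroyFix]
  | succ n ih =>
    intro l
    rw [destroyFix]
    by_cases heq : (passA I l.length l 0 == l) = true
    · simp only [heq, if_true]
      exact pass_red I l.length l 0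
    · simp only [heq, Bool.false_eq_true, if_false]
      rw [ih, pass_red I l.length l 0]

-- with enough fuel, A's result is a fixpoint of the pass
theorem destroyFix_fix (I : List Char) :
    ∀ (fuel : Nat) (l : List Char), l.length < fuel →
    passA I (destroyFix I fuel l).length (destroyFix I fuel l) 0 = destroyFix I fuel l := by
  intro fuel
  induction fuel with
  | zero => intro l hl; omega
  | succ n ih =>
    intro l hl
    rw [destroyFix]
    by_cases heq : (passA I l.length l 0 == l) = true
    · simp only [heq, if_true]
      have hpl : passA I l.length l 0 = l := by simpa using heq
      rw [hpl]
      exact hpl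
    · simp only [heq, Bool.false_eq_true, if_false]
      have hne : passA I l.length l 0 ≠ l := by simpa using heq
      have hlt : (passA I l.length l 0).length < l.length := by
        rcases passA_eq_or_lt I l.length l 0 with he | h
        · exact absurd he hne
        · exact h
      exact ih (passA I l.length l 0) (by omega)

-- a sufficiently fueled fixpoint of the pass has no target character and no reacting adjacent pair
theorem passA_fix_facts (I : List Char) :
    ∀ (fuel : Nat) (l : List Char) (i : Nat), l.length ≤ i + fuel →
    passA I fuel l i = l →
    ∀ j, i ≤ j → (h : j < l.length) →
    (isT1 I l[j] || isT2 I l[j]) = false ∧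
    (∀ (h2 : j + 1 < l.length), (l[j] == pySwap l[j + 1]) = false) := by
  intro fuel
  induction fuel with
  | zero => intro l i hle _ j hij hj; omega
  | succ n ih =>
    intro l i hle hfix j hij hj
    rw [passA] at hfix
    have h : i < l.length := by omega
    rw [dif_pos h] at hfix
    have hel : (l.eraseIdx i).length = l.length - 1 := by
      rw [List.length_eraseIdx, if_pos h]
    by_cases h1 : isT1 I l[i] = true
    · exfalso
      rw [if_pos h1] at hfix
      have hlen : (passA I n (l.eraseIdx i) (i+1)).length ≤ (l.eraseIdx i).length := by
        rcases passA_eq_or_lt I n (l.eraseIdx i) (i+1) with he | hlt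
        · rw [he]
        · omega
      rw [hfix, hel] at hlen
      omega
    · rw [if_neg h1] at hfix
      by_cases h2 : isT2 I l[i] = true
      · exfalso
        rw [if_pos h2] at hfix
        have hlen : (passA I n (l.eraseIdx i) (i+1)).length ≤ (l.eraseIdx i).length := by
          rcases passA_eq_or_lt I n (l.eraseIdx i) (i+1) with he | hlt
          · rw [he]
          · omega
        rw [hfix, hel] at hlen
        omega
      · rw [if_neg h2] at hfix
        by_cases h3 : i + 1 < l.length
        · rw [dif_pos h3] at hfix
          by_cases h4 : (l[i] == pySwap l[i + 1]) = true
          · exfalso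
            rw [if_pos h4] at hfix
            have hel2 : ((l.eraseIdx i).eraseIdx i).length = l.length - 2 := by
              rw [List.length_eraseIdx, List.length_eraseIdx]
              split_ifs <;> omega
            have hlen : (passA I n ((l.eraseIdx i).eraseIdx i) (i+1)).length ≤ ((l.eraseIdx i).eraseIdx i).length := by
              rcases passA_eq_or_lt I n ((l.eraseIdx i).eraseIdx i) (i+1) with he | hlt
              · rw [he]
              · omega
            rw [hfix, hel2] at hlen
            omega
          · rw [if_neg h4] at hfix
            by_cases hji : j = i
            · subst hji
              refine ⟨?_, fun _ => by simpa using h4⟩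
              rw [Bool.or_eq_false_iff]
              exact ⟨by simpa using h1, by simpa using h2⟩
            · exact ih l (i + 1) (by omega) hfix j (by omega) hj
        · rw [dif_neg h3] at hfix
          by_cases hji : j = i
          · subst hji
            refine ⟨?_, fun h2' => absurd h2' h3⟩
            rw [Bool.or_eq_false_iff]
            exact ⟨by simpa using h1, by simpa using h2⟩
          · exact ih l (i + 1) (by omega) hfix j (by omega) hj

-- on a fully reduced, target-free list B's fold just pushes everything
theorem red_pushall (I : List Char) :
    ∀ (l : List Char) (st : List Char),
    (∀ c ∈ l, (isT1 I c || isT2 I c) = false) →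
    List.IsChain (fun a b => (a == pySwap b) = false) l →
    (∀ t c, st.head? = some t → l.head? = some c → (t == pySwap c) = false) →
    List.foldl (stackStep I) st l = l.reverse ++ st := by
  intro l
  induction l with
  | nil => intro st _ _ _; simp
  | cons c r ih =>
    intro st htar hch hhd
    have htc : (isT1 I c || isT2 I c) = false := htar c (by simp)
    rw [List.isChain_cons] at hch
    have hstep : stackStep I st c = c :: st := by
      cases st with
      | nil => rw [stackStep_nil I c htc]
      | cons t rest => exact stackStep_push I t rest c htc (hhd t c rfl rfl)
    rw [List.foldl_cons, hstep,
      ih (c :: st) (fun x hx => htar x (by simp [hx])) hch.2 ?_]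
    · simp
    · intro t c' ht hc'
      simp only [List.head?_cons, Option.some.injEq] at ht
      subst ht
      exact hch.1 c' (by simpa using hc')

-- ===== VERDICT (by name: the statement is the Claim_ definition above) =====
theorem destroyer_spec : Claim_equal_destroyer := by
  intro instring inchar _
  unfold Spec_destroyer destroyer destroyer_alt
  set I := inchar.toList with hI
  set l := instring.toList with hl
  set r := destroyFix I (l.length + 1) l with hr
  have hfix : passA I r.length r 0 = r := by
    rw [hr]
    exact destroyFix_fix I (l.length + 1) l (by omega)
  have hfacts := passA_fix_facts I r.length r 0 (by omega) hfix
  have htar : ∀ c ∈ r, (isT1 I c || isT2 I c) = false := by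
    intro c hc
    obtain ⟨j, hj, rfl⟩ := List.mem_iff_getElem.mp hc
    exact (hfacts j (Nat.zero_le j) hj).1
  have hch : List.IsChain (fun a b => (a == pySwap b) = false) r := by
    rw [List.isChain_iff_getElem]
    intro j hj
    exact (hfacts j (Nat.zero_le j) (by omega)).2 hj
  have hpush := red_pushall I r [] htar hch (by intro t c ht hc; simp at ht)
  have hred := destroyFix_red I (l.length + 1) l
  rw [← hr] at hred
  rw [← hred, hpush]
  simp
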